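-- pv_equiv track=rewrite | github.com/Thiraput01/Algorithm-degisn-2024 | Python File/HwEND.py | get_adjacency_set
-- ===== SOURCE A (Python) =====
-- def get_adjacency_set(pairs):
--     d = {}
--     for id1,id2 in pairs:
--         if id1 in d:
--             d[id1].add(id2)
--         else:
--             d[id1] = {id2}
--     for id2,id1 in pairs:
--         if id1 in d:
--             d[id1].add(id2)
--         else:
--             d[id1] = {id2}
--     return d
-- ===== SOURCE B (Python) =====
-- def get_adjacency_set(pairs):
--     keys = list(dict.fromkeys([a for a, b in pairs] + [b for a, b in pairs]))
--     return {k: {b for a, b in pairs if a == k} | {a for a, b in pairs if b == k}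
--             for k in keys}
-- ===== Notes on version B (the rewrite author's own statement) =====
-- stated objective: idiomatic
-- what changed: A builds the dict by two mutating passes over the pairs (forward edges, then reversed edges); B first deduplicates the key list (firsts then seconds) and builds the result in one dict comprehension, computing each key's neighbour set directly as {b | (k,b) in pairs} | {a | (a,k) in pairs}.
import Mathlib
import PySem

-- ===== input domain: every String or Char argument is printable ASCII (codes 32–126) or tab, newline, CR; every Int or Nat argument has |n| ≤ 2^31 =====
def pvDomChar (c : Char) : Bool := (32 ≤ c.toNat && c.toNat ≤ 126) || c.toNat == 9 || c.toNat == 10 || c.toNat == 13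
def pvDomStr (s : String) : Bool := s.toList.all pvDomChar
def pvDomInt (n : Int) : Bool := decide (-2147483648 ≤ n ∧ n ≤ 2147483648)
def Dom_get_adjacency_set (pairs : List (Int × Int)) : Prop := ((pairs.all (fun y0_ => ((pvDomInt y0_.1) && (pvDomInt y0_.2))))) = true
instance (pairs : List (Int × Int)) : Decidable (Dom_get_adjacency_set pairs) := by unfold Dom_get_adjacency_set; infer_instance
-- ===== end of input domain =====

-- B replaces A's two dict-mutating passes by one comprehension over the deduplicated key list,
-- collecting each key's forward and backward neighbours directly (objective: idiomatic; B rescans pairs per key, O(n*k)).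

-- ===== PORT A =====
-- A: first loop adds id2 to d[id1] (creating {id2} if absent), second loop the same with the pair swapped.
def get_adjacency_set (pairs : List (Int × Int)) : List (Int × List Int) :=
  (pairs.foldl (fun d p => PySem.Dict.modify d p.2 PySem.Set.empty (fun s => PySem.Set.add s p.1))
    (pairs.foldl (fun d p => PySem.Dict.modify d p.1 PySem.Set.empty (fun s => PySem.Set.add s p.2))
      (PySem.Dict.empty : PySem.Dict Int (PySem.Set Int)))).items

-- ===== PORT B =====
-- B: keys = list(dict.fromkeys(firsts + seconds)); value of k = {b | (k,b) ∈ pairs} ∪ {a | (a,k) ∈ pairs}.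
def get_adjacency_set_alt (pairs : List (Int × Int)) : List (Int × List Int) :=
  (PySem.List.dedup (pairs.map (fun p => p.1) ++ pairs.map (fun p => p.2))).map (fun k =>
    (k, PySem.Set.union
          (PySem.Set.ofList ((pairs.filter (fun p => p.1 == k)).map (fun p => p.2)))
          (PySem.Set.ofList ((pairs.filter (fun p => p.2 == k)).map (fun p => p.1)))))

-- ===== PRECONDITION & SPEC =====
def Spec_get_adjacency_set (pairs : List (Int × Int)) (out : List (Int × List Int)) : Prop := out = get_adjacency_set_alt pairs
instance (pairs : List (Int × Int)) (out : List (Int × List Int)) : Decidable (Spec_get_adjacency_set pairs out) := by unfold Spec_get_adjacency_set; infer_instance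

-- ===== CLAIM (what is proved, stated in full; the proofs are below) =====
def Claim_equal_get_adjacency_set : Prop := ∀ (pairs : List (Int × Int)), Dom_get_adjacency_set pairs → Spec_get_adjacency_set pairs (get_adjacency_set pairs)

-- ===== LEMMAS AND PROOFS =====

-- find? on a canonical association list keyed by `ks`
theorem find?_canon (ks : List Int) (g : Int → List Int) (k : Int) :
    (ks.map (fun k' => (k', g k'))).find? (fun p => p.1 == k)
      = if k ∈ ks then some (k, g k) else none := by
  induction ks with
  | nil => simp
  | cons a ks ih =>
    by_cases h : a = k
    · subst h; simp
    · simp [h, ih, Ne.symm h]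

theorem contains_canon (ks : List Int) (g : Int → List Int) (k : Int) :
    PySem.Dict.contains (PySem.Dict.mk (ks.map (fun k' => (k', g k')))) k = decide (k ∈ ks) := by
  by_cases h : k ∈ ks
  · simp only [PySem.Dict.contains, List.any_map, Function.comp_def, h,
      decide_true, List.any_eq_true]
    exact ⟨k, h, by simp⟩
  · simp only [PySem.Dict.contains, List.any_map, Function.comp_def,
      List.any_eq_false, h, decide_false]
    intro a ha
    have hne : a ≠ k := fun hh => h (hh ▸ ha)
    simp [hne]

theorem getD_canon (ks : List Int) (g : Int → List Int) (k : Int) :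
    PySem.Dict.getD (PySem.Dict.mk (ks.map (fun k' => (k', g k')))) k PySem.Set.empty
      = if k ∈ ks then g k else PySem.Set.empty := by
  show (Option.map (fun x => x.2) ((ks.map (fun k' => (k', g k'))).find? (fun p => p.1 == k))).getD
      PySem.Set.empty = _
  rw [find?_canon]
  split <;> rfl

-- one `modify` step on a canonical association list
theorem modify_canon (ks : List Int) (g : Int → List Int) (k v : Int) :
    (PySem.Dict.modify (PySem.Dict.mk (ks.map (fun k' => (k', g k')))) k PySem.Set.empty
        (fun s => PySem.Set.add s v)).items
      = if k ∈ ks then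
          ks.map (fun k' => (k', if k' = k then PySem.Set.add (g k) v else g k'))
        else
          ks.map (fun k' => (k', g k')) ++ [(k, PySem.Set.add PySem.Set.empty v)] := by
  by_cases h : k ∈ ks
  · simp only [PySem.Dict.modify, PySem.Dict.insert, contains_canon, getD_canon, h, if_pos,
      decide_eq_true_eq]
    simp only [List.map_map]
    refine List.map_congr_left (fun a _ => ?_)
    by_cases ha : a = k <;> simp [ha]
  · simp only [PySem.Dict.modify, PySem.Dict.insert, contains_canon, getD_canon, h,
      decide_eq_true_eq, if_false]

-- appending one element to the ordered dedup
theorem dedup_append_singleton (l : List Int) (x : Int) :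
    PySem.List.dedup (l ++ [x]) = PySem.Set.add (PySem.List.dedup l) x := by
  simp [PySem.List.dedup, PySem.Set.ofList, List.foldl_append]

theorem ofList_append_singleton (l : List Int) (x : Int) :
    PySem.Set.ofList (l ++ [x]) = PySem.Set.add (PySem.Set.ofList l) x := by
  simp [PySem.Set.ofList, List.foldl_append]

-- updating with a deduplicated list is updating with the list
theorem update_dedup (l : List Int) (s : PySem.Set Int) :
    PySem.Set.update s (PySem.Set.ofList l) = PySem.Set.update s l := by
  induction l using List.reverseRecOn generalizing s with
  | nil => rfl
  | append_singleton l x ih =>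
    have hupd : ∀ (t : List Int), PySem.Set.update s (t ++ [x]) = PySem.Set.add (PySem.Set.update s t) x := by
      intro t; simp [PySem.Set.update, List.foldl_append]
    by_cases h : x ∈ PySem.Set.ofList l
    · have hxl : x ∈ l := (PySem.Set.mem_ofList l x).mp h
      have hmem : x ∈ PySem.Set.update s l := (PySem.Set.mem_update s l x).mpr (Or.inr hxl)
      rw [ofList_append_singleton, PySem.Set.add_of_mem h, ih, hupd,
        PySem.Set.add_of_mem hmem]
    · have hadd : PySem.Set.add (PySem.Set.ofList l) x = PySem.Set.ofList l ++ [x] := by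
        simp only [PySem.Set.add, PySem.Set.contains, List.contains_eq_mem, h, decide_false,
          Bool.false_eq_true, if_false]
      rw [ofList_append_singleton, hadd, hupd, hupd, ih]

-- the heart: the items of A's fold, in closed form
theorem items_fold (es : List (Int × Int)) :
    (es.foldl (fun d p => PySem.Dict.modify d p.1 PySem.Set.empty (fun s => PySem.Set.add s p.2))
        PySem.Dict.empty).items
      = (PySem.List.dedup (es.map Prod.fst)).map
          (fun k => (k, PySem.Set.ofList ((es.filter (fun p => p.1 == k)).map Prod.snd))) := by
  induction es using List.reverseRecOn with
  | nil => rfl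
  | append_singleton es p ih =>
    rw [List.foldl_append, List.foldl_cons, List.foldl_nil]
    have hD : es.foldl (fun d q => PySem.Dict.modify d q.1 PySem.Set.empty (fun s => PySem.Set.add s q.2))
        PySem.Dict.empty
        = PySem.Dict.mk ((PySem.List.dedup (es.map Prod.fst)).map
            (fun k => (k, PySem.Set.ofList ((es.filter (fun q => q.1 == k)).map Prod.snd)))) := by
      apply PySem.Dict.ext; exact ih
    rw [hD]
    set ks := PySem.List.dedup (es.map Prod.fst) with hks
    set g : Int → List Int := fun k => PySem.Set.ofList ((es.filter (fun q => q.1 == k)).map Prod.snd) with hg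
    rw [modify_canon]
    have hmapfst : (es ++ [p]).map Prod.fst = es.map Prod.fst ++ [p.1] := by simp
    have hfilter : ∀ k, ((es ++ [p]).filter (fun q => q.1 == k)).map Prod.snd
        = ((es.filter (fun q => q.1 == k)).map Prod.snd) ++ (if p.1 = k then [p.2] else []) := by
      intro k
      rw [List.filter_append]
      by_cases h : p.1 = k <;> simp [h]
    by_cases h : p.1 ∈ ks
    · rw [if_pos h, hmapfst, dedup_append_singleton, ← hks,
        PySem.Set.add_of_mem h]
      refine List.map_congr_left (fun a ha => ?_)
      rw [hfilter a]
      by_cases hak : a = p.1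
      · subst hak; simp [PySem.Set.ofList_append]
      · simp [Ne.symm hak, hak]
    · rw [if_neg h, hmapfst, dedup_append_singleton, ← hks]
      have hadd : PySem.Set.add ks p.1 = ks ++ [p.1] := by
        simp [PySem.Set.add, PySem.Set.contains, h]
      rw [hadd, List.map_append]
      congr 1
      · refine List.map_congr_left (fun a ha => ?_)
        have hak : a ≠ p.1 := fun hh => h (hh ▸ ha)
        rw [hfilter a]
        simp [Ne.symm hak]
      · have hnf : es.filter (fun q => q.1 == p.1) = [] := by
          rw [List.filter_eq_nil_iff]
          intro q hq hbe
          apply h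
          rw [hks, PySem.List.mem_dedup]
          exact (beq_iff_eq.mp hbe) ▸ List.mem_map_of_mem hq
        simp [hnf, PySem.Set.ofList, PySem.Set.add, PySem.Set.empty, PySem.Set.contains]

-- ===== VERDICT (by name: the statement is the Claim_ definition above) =====
theorem get_adjacency_set_spec : Claim_equal_get_adjacency_set := by
  intro pairs _
  unfold Spec_get_adjacency_set get_adjacency_set get_adjacency_set_alt
  -- fuse A's two folds into one fold over pairs ++ pairs.map swap
  have hswap : ∀ d0 : PySem.Dict Int (PySem.Set Int),
      pairs.foldl (fun d p => PySem.Dict.modify d p.2 PySem.Set.empty (fun s => PySem.Set.add s p.1)) d0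
        = (pairs.map (fun p => (p.2, p.1))).foldl
            (fun d p => PySem.Dict.modify d p.1 PySem.Set.empty (fun s => PySem.Set.add s p.2)) d0 := by
    intro d0; rw [List.foldl_map]
  rw [hswap, ← List.foldl_append, items_fold (pairs ++ pairs.map (fun p => (p.2, p.1)))]
  have hkeys : (pairs ++ pairs.map (fun p => (p.2, p.1))).map Prod.fst
      = pairs.map (fun p => p.1) ++ pairs.map (fun p => p.2) := by
    simp [List.map_map]
  rw [hkeys]
  refine List.map_congr_left (fun k _ => ?_)
  have hflt : ((pairs ++ pairs.map (fun p => (p.2, p.1))).filter (fun p => p.1 == k)).map Prod.snd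
      = (pairs.filter (fun p => p.1 == k)).map (fun p => p.2)
        ++ (pairs.filter (fun p => p.2 == k)).map (fun p => p.1) := by
    rw [List.filter_append, List.map_append, List.filter_map]
    simp [Function.comp_def, List.map_map]
  rw [hflt, PySem.Set.ofList_append, PySem.Set.union, update_dedup]
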